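-- pv_equiv track=rewrite | github.com/hkp1030/maple-auction-notification | search.py | format_number_korean
-- ===== SOURCE A (Python) =====
-- def format_number_korean(number):
--     units = ['', '만', '억', '조', '경']
--     result = []
--     unit_index = 0
--
--     while number > 0:
--         part = number % 10000
--         if part > 0:
--             result.insert(0, f'{part}{units[unit_index]}')
--         number //= 10000
--         unit_index += 1
--
--     return ' '.join(result) if result else '0'
-- ===== SOURCE B (Python) =====
-- def format_number_korean(number):
--     units = ['', '만', '억', '조', '경']
--     if number <= 0:
--         return '0'
--     parts = []
--     for i in reversed(range(len(units))):
--         chunk = number // 10000 ** i % 10000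
--         if chunk > 0:
--             parts.append(f'{chunk}{units[i]}')
--     return ' '.join(parts)
-- ===== Notes on version B (the rewrite author's own statement) =====
-- stated objective: alternative
-- what changed: A repeatedly divides the number by 10000 in a while loop, prepending each nonzero chunk with insert(0); B handles non-positive input up front and makes one forward pass over the unit indices from the top down, extracting each 4-digit chunk non-destructively with number // 10000**i % 10000 and appending.
import Mathlib
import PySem

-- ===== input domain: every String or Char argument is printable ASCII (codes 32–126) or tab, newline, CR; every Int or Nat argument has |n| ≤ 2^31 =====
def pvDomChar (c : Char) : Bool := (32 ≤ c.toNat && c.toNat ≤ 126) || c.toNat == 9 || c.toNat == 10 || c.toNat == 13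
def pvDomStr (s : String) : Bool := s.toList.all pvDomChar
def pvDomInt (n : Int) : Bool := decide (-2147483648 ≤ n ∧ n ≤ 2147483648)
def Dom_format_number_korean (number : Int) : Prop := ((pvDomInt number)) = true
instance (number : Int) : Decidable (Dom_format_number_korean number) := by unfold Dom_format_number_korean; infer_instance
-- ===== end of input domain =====

-- B replaces A's destructive while-loop (repeated number //= 10000 with result.insert(0, …))
-- by one forward pass over the unit indices from the top down, extracting each 4-digit chunk
-- with the direct formula number // 10000**i % 10000 and appending; objective: alternative.

-- ===== PORT A =====
-- units = ['', '만', '억', '조', '경'] (the same literal list appears in both sources)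
def fnkUnits : List String := ["", "만", "억", "조", "경"]

-- A's while-loop: state (number, unit_index, result); result.insert(0, x) prepends.
-- units[unit_index] is ported as pyGetD with default "" — exact whenever unit_index < 5,
-- always the case on Dom (|number| ≤ 2^31 < 10000^3; Python raises only for number ≥ 10^20).
def fnkLoop (number : Int) (unit_index : Int) (result : List String) : List String :=
  if h : number > 0 then
    let part := PySem.Int.mod number 10000
    let result' :=
      if part > 0 then (PySem.Int.toStr part ++ PySem.List.pyGetD fnkUnits unit_index "") :: result
      else result
    fnkLoop (PySem.Int.floordiv number 10000) (unit_index + 1) result'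
  else result
termination_by number.toNat
decreasing_by
  simp only [PySem.Int.floordiv_eq_ediv_of_pos (a := number) (show (0:Int) < 10000 by norm_num)]
  omega

def format_number_korean (number : Int) : String :=
  let result := fnkLoop number 0 []
  if result = [] then "0" else PySem.Str.join " " result

-- ===== PORT B =====
-- B: single forward pass over reversed(range(len(units))); 10000 ** i is ported as
-- 10000 ^ i.toNat (exact, since every i produced by the range is nonnegative).
def format_number_korean_alt (number : Int) : String :=
  if number ≤ 0 then "0"
  else
    let parts := ((PySem.List.pyRange 0 (PySem.List.len fnkUnits) 1).reverse).foldl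
      (fun acc i =>
        let chunk := PySem.Int.mod (PySem.Int.floordiv number (10000 ^ i.toNat)) 10000
        if chunk > 0 then acc ++ [PySem.Int.toStr chunk ++ PySem.List.pyGetD fnkUnits i ""]
        else acc) []
    PySem.Str.join " " parts

-- ===== PRECONDITION & SPEC =====
def Spec_format_number_korean (number : Int) (out : String) : Prop := out = format_number_korean_alt number
instance (number : Int) (out : String) : Decidable (Spec_format_number_korean number out) := by unfold Spec_format_number_korean; infer_instance

-- ===== CLAIM (what is proved, stated in full; the proofs are below) =====
def Claim_equal_format_number_korean : Prop := ∀ (number : Int), Dom_format_number_korean number → Spec_format_number_korean number (format_number_korean number)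

-- ===== LEMMAS AND PROOFS =====

theorem fnkLoop_nonpos (n i : Int) (res : List String) (h : ¬ n > 0) :
    fnkLoop n i res = res := by
  rw [fnkLoop]; simp [h]

theorem fnkLoop_pos (n i : Int) (res : List String) (h : n > 0) :
    fnkLoop n i res =
      fnkLoop (PySem.Int.floordiv n 10000) (i + 1)
        (if PySem.Int.mod n 10000 > 0 then
          (PySem.Int.toStr (PySem.Int.mod n 10000) ++ PySem.List.pyGetD fnkUnits i "") :: res
        else res) := by
  rw [fnkLoop]; simp [h]

-- closed form of A's loop on 0 < n ≤ 2^31: the three possible chunks, most significant first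
theorem fnk_main (n : Int) (h0 : 0 < n) (h1 : n ≤ 2147483648) :
    fnkLoop n 0 [] =
      (if n / 100000000 % 10000 > 0 then [PySem.Int.toStr (n / 100000000 % 10000) ++ "억"] else []) ++
      (if n / 10000 % 10000 > 0 then [PySem.Int.toStr (n / 10000 % 10000) ++ "만"] else []) ++
      (if n % 10000 > 0 then [PySem.Int.toStr (n % 10000) ++ ""] else []) := by
  have hfd : ∀ a : Int, PySem.Int.floordiv a 10000 = a / 10000 := fun a =>
    PySem.Int.floordiv_eq_ediv_of_pos (by norm_num)
  have hmd : ∀ a : Int, PySem.Int.mod a 10000 = a % 10000 := fun a =>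
    PySem.Int.mod_eq_emod_of_pos (by norm_num)
  rw [fnkLoop_pos n 0 [] h0]
  by_cases h2 : PySem.Int.floordiv n 10000 > 0
  · rw [fnkLoop_pos _ _ _ h2]
    by_cases h3 : PySem.Int.floordiv (PySem.Int.floordiv n 10000) 10000 > 0
    · rw [fnkLoop_pos _ _ _ h3]
      rw [fnkLoop_nonpos _ _ _ (by simp only [hfd]; omega)]
      simp only [hfd, hmd] at *
      have e1 : n / 10000 / 10000 % 10000 = n / 100000000 % 10000 := by omega
      have e2 : n / 10000 / 10000 % 10000 > 0 := by omega
      rw [e1] at e2 ⊢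
      simp only [if_pos e2]
      split_ifs <;> simp_all <;> decide
    · rw [fnkLoop_nonpos _ _ _ h3]
      simp only [hfd, hmd] at *
      have e0 : n / 100000000 % 10000 = 0 := by omega
      rw [e0]
      norm_num
      split_ifs <;> simp_all <;> decide
  · rw [fnkLoop_nonpos _ _ _ h2]
    simp only [hfd, hmd] at *
    have e0 : n / 100000000 % 10000 = 0 := by omega
    have e1 : n / 10000 % 10000 = 0 := by omega
    have e2 : n % 10000 > 0 := by omega
    rw [e0, e1]
    norm_num [e2]
    decide

theorem fnk_eq_of_pos (n : Int) (h0 : 0 < n) (h1 : n ≤ 2147483648) :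
    format_number_korean n = format_number_korean_alt n := by
  unfold format_number_korean format_number_korean_alt
  have hrange : ((PySem.List.pyRange 0 (PySem.List.len fnkUnits) 1).reverse) = [4,3,2,1,0] := by decide
  rw [hrange, if_neg (show ¬ n ≤ 0 by omega), fnk_main n h0 h1]
  simp only [List.foldl]
  have c4 : PySem.Int.mod (PySem.Int.floordiv n (10000 ^ Int.toNat 4)) 10000 = 0 := by
    rw [show (10000:Int) ^ Int.toNat 4 = 10000000000000000 by decide,
        PySem.Int.floordiv_eq_ediv_of_pos (by norm_num),
        PySem.Int.mod_eq_emod_of_pos (by norm_num)]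
    omega
  have c3 : PySem.Int.mod (PySem.Int.floordiv n (10000 ^ Int.toNat 3)) 10000 = 0 := by
    rw [show (10000:Int) ^ Int.toNat 3 = 1000000000000 by decide,
        PySem.Int.floordiv_eq_ediv_of_pos (by norm_num),
        PySem.Int.mod_eq_emod_of_pos (by norm_num)]
    omega
  have c2 : PySem.Int.mod (PySem.Int.floordiv n (10000 ^ Int.toNat 2)) 10000 = n / 100000000 % 10000 := by
    rw [show (10000:Int) ^ Int.toNat 2 = 100000000 by decide,
        PySem.Int.floordiv_eq_ediv_of_pos (by norm_num),
        PySem.Int.mod_eq_emod_of_pos (by norm_num)]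
  have c1 : PySem.Int.mod (PySem.Int.floordiv n (10000 ^ Int.toNat 1)) 10000 = n / 10000 % 10000 := by
    rw [show (10000:Int) ^ Int.toNat 1 = 10000 by decide,
        PySem.Int.floordiv_eq_ediv_of_pos (by norm_num),
        PySem.Int.mod_eq_emod_of_pos (by norm_num)]
  have c0 : PySem.Int.mod (PySem.Int.floordiv n (10000 ^ Int.toNat 0)) 10000 = n % 10000 := by
    rw [show (10000:Int) ^ Int.toNat 0 = 1 by decide,
        PySem.Int.floordiv_eq_ediv_of_pos (by norm_num),
        PySem.Int.mod_eq_emod_of_pos (by norm_num)]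
    omega
  have hu2 : PySem.List.pyGetD fnkUnits (2:Int) "" = "억" := by decide
  have hu1 : PySem.List.pyGetD fnkUnits (1:Int) "" = "만" := by decide
  have hu0 : PySem.List.pyGetD fnkUnits (0:Int) "" = "" := by decide
  simp only [c4, c3, c2, c1, c0, hu2, hu1, hu0]
  norm_num
  split_ifs <;> simp_all <;> omega

-- ===== VERDICT (by name: the statement is the Claim_ definition above) =====
theorem format_number_korean_spec : Claim_equal_format_number_korean := by
  intro n hdom
  have hb : -2147483648 ≤ n ∧ n ≤ 2147483648 := by
    unfold Dom_format_number_korean pvDomInt at hdom; simpa using hdom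
  unfold Spec_format_number_korean
  by_cases hpos : 0 < n
  · exact fnk_eq_of_pos n hpos hb.2
  · unfold format_number_korean format_number_korean_alt
    rw [fnkLoop_nonpos n 0 [] hpos, if_pos rfl, if_pos (by omega)]
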